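-- pv_equiv track=rewrite | github.com/Zeka-0337/Problem-Solving | programmers/level_2/광물 캐기.py | solution
-- ===== SOURCE A (Python) =====
-- import math
-- from typing import List
--
-- def solution(picks: List[int], minerals: List[str]) -> int:
--     """
--     Idea
--     - 5개씩 나눠서 각 광물의 개수를 count.
--     - pick의 수가 부족할 수 있으니 slice.
--     - sort후 뒤부터 pop하여 다이아몬드 곡갱이부터 사용.
--     """
--     counts = []
--     # Table
--     tir = [[1, 1, 1], [5, 1, 1], [25, 5, 1]]
--     # 5개씩 묶어서 count.
--     for i in range(math.ceil(len(minerals)/5)):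
--         part = minerals[i*5: (i+1)*5]
--         counts.append([
--             part.count("diamond"),
--             part.count("iron"),
--             part.count("stone")])
--     counts = counts[:sum(picks)]
--     # 피로도 오름차순 정렬.
--     counts.sort()
--     answer = 0
--     # 다이아 곡괭이 부터.
--     for pick, tir in zip(picks, tir):
--         for _ in range(pick):
--             if not counts:
--                 return answer
--             # 가장 피로도가 높은 케이스 pop.
--             d, i, s = counts.pop()
--             answer += tir[0] * d + tir[1] * i + tir[2] * s
--     return answer
-- ===== SOURCE B (Python) =====
-- def solution(picks, minerals):
--     # Summarize each 5-mineral group as one key 36*d + 6*i + s (counts are at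
--     # most 5, so keys order like the (d, i, s) triples) and counting-sort the
--     # keys into buckets instead of comparison-sorting count triples; then spend
--     # the picks along the bucketed order from the costliest group down.
--     keys = []
--     for g in range((len(minerals) + 4) // 5):
--         d = i = s = 0
--         for m in minerals[5 * g: 5 * g + 5]:
--             if m == "diamond":
--                 d += 1
--             elif m == "iron":
--                 i += 1
--             elif m == "stone":
--                 s += 1
--         keys.append(36 * d + 6 * i + s)
--     buckets = {}
--     for k in keys[:sum(picks)]:
--         buckets[k] = buckets.get(k, 0) + 1
--     order = []
--     for key in range(215, -1, -1):
--         order.extend([key] * buckets.get(key, 0))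
--     fatigue = [(1, 1, 1), (5, 1, 1), (25, 5, 1)]
--     answer = 0
--     idx = 0
--     for pick, (fd, fi, fs) in zip(picks, fatigue):
--         for _ in range(pick):
--             if idx == len(order):
--                 return answer
--             d, r = divmod(order[idx], 36)
--             i, s = divmod(r, 6)
--             answer += fd * d + fi * i + fs * s
--             idx += 1
--     return answer
-- ===== Notes on version B (the rewrite author's own statement) =====
-- stated objective: alternative
-- what changed: Summarizes each 5-mineral group as a single bounded key 36*d+6*i+s and counting-sorts the keys into buckets (key order = lexicographic order of the count triples) instead of comparison-sorting a list of [d,i,s] triples, then spends the picks scanning the bucketed order forward instead of popping the sorted list from the back.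
import Mathlib
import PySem

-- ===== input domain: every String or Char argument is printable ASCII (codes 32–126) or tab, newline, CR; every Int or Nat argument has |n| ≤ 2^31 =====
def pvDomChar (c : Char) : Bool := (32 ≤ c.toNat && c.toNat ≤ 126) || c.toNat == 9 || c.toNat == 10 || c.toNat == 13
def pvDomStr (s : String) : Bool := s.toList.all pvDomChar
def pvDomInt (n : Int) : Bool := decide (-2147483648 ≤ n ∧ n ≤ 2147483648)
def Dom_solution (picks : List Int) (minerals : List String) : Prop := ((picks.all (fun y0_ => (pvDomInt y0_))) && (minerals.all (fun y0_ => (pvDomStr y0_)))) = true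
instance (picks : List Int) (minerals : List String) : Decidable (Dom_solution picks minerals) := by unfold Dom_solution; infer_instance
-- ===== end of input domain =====

-- B replaces A's comparison sort of per-group [d,i,s] count triples by a counting sort of
-- the bounded keys 36*d+6*i+s into buckets, and walks the bucketed order forward.

-- ===== PORT A =====
-- inner 'for _ in range(pick)' loop: Bool flag = the early 'return answer' fired
def pvInnerA : Nat → List (List Int) → List Int → Int → Bool × List (List Int) × Int
  | 0, cs, _, a => (false, cs, a)
  | Nat.succ n, cs, t, a =>
    match cs.getLast? with
    | none => (true, cs, a)            -- 'if not counts: return answer'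
    | some l =>                        -- 'd, i, s = counts.pop()' (l is always [d,i,s])
      pvInnerA n cs.dropLast t
        (a + (t.getD 0 0 * l.getD 0 0 + t.getD 1 0 * l.getD 1 0 + t.getD 2 0 * l.getD 2 0))

-- outer 'for pick, tir in zip(picks, tir)' loop
def pvOuterA : List (Int × List Int) → List (List Int) → Int → Int
  | [], _, a => a
  | (p, t) :: rest, cs, a =>
    match pvInnerA p.toNat cs t a with
    | (true, _, a') => a'
    | (false, cs', a') => pvOuterA rest cs' a'

def solution (picks : List Int) (minerals : List String) : Int :=
  -- math.ceil(len(minerals)/5): exact integer ceiling (floats are exact at these lengths)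
  let g : Int := PySem.Int.floordiv ((minerals.length : Int) + 4) 5
  let counts : List (List Int) :=
    (PySem.List.pyRange 0 g 1).foldl (fun acc i =>
      let part := PySem.List.slice minerals (some (i * 5)) (some ((i + 1) * 5))
      acc ++ [[(PySem.List.count part "diamond" : Int),
               (PySem.List.count part "iron" : Int),
               (PySem.List.count part "stone" : Int)]]) []
  let counts2 := PySem.List.slice counts none (some picks.sum)
  let counts3 := PySem.List.sorted counts2 (fun x => x) false
  pvOuterA (picks.zip [[1, 1, 1], [5, 1, 1], [25, 5, 1]]) counts3 0

-- ===== PORT B =====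
-- inner 'for _ in range(pick)' loop of Source B: Bool flag = the early 'return answer' fired;
-- the state is the cursor idx into the fixed list 'order'
def pvInnerB : Nat → List Int → Nat → Int × Int × Int → Int → Bool × Nat × Int
  | 0, _, idx, _, a => (false, idx, a)
  | Nat.succ n, ord, idx, f, a =>
    if idx = ord.length then (true, idx, a)   -- 'if idx == len(order): return answer'
    else
      -- order[idx]: the guard above ensures idx < len(order), so getD is exact here
      let k := ord.getD idx 0
      pvInnerB n ord (idx + 1) f
        (a + (f.1 * PySem.Int.floordiv k 36 +
              f.2.1 * PySem.Int.floordiv (PySem.Int.mod k 36) 6 +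
              f.2.2 * PySem.Int.mod (PySem.Int.mod k 36) 6))

-- outer 'for pick, (fd, fi, fs) in zip(picks, fatigue)' loop of Source B
def pvOuterB : List (Int × (Int × Int × Int)) → List Int → Nat → Int → Int
  | [], _, _, a => a
  | (p, f) :: rest, ord, idx, a =>
    match pvInnerB p.toNat ord idx f a with
    | (true, _, a') => a'
    | (false, idx', a') => pvOuterB rest ord idx' a'

def solution_alt (picks : List Int) (minerals : List String) : Int :=
  let keys : List Int :=
    (PySem.List.pyRange 0 (PySem.Int.floordiv ((minerals.length : Int) + 4) 5) 1).foldl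
      (fun acc g =>
        let part := PySem.List.slice minerals (some (5 * g)) (some (5 * g + 5))
        let trip := part.foldl (fun (st : Int × Int × Int) m =>
            if m = "diamond" then (st.1 + 1, st.2.1, st.2.2)
            else if m = "iron" then (st.1, st.2.1 + 1, st.2.2)
            else if m = "stone" then (st.1, st.2.1, st.2.2 + 1)
            else st) (0, 0, 0)
        acc ++ [36 * trip.1 + 6 * trip.2.1 + trip.2.2]) []
  -- buckets[k] = buckets.get(k, 0) + 1 over keys[:sum(picks)]
  let buckets : PySem.Dict Int Int :=
    (PySem.List.slice keys none (some picks.sum)).foldl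
      (fun d k => d.modify k 0 (fun x => x + 1)) PySem.Dict.empty
  -- order.extend([key] * buckets.get(key, 0)) for key in range(215, -1, -1)
  let order : List Int :=
    (PySem.List.pyRange 215 (-1) (-1)).foldl
      (fun acc key => acc ++ PySem.List.pyRepeat [key] (buckets.getD key 0)) []
  pvOuterB (picks.zip [(1, 1, 1), (5, 1, 1), (25, 5, 1)]) order 0 0

-- ===== PRECONDITION & SPEC =====
def Spec_solution (picks : List Int) (minerals : List String) (out : Int) : Prop := out = solution_alt picks minerals
instance (picks : List Int) (minerals : List String) (out : Int) : Decidable (Spec_solution picks minerals out) := by unfold Spec_solution; infer_instance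

-- ===== CLAIM (what is proved, stated in full; the proofs are below) =====
def Claim_equal_solution : Prop := ∀ (picks : List Int) (minerals : List String), Dom_solution picks minerals → Spec_solution picks minerals (solution picks minerals)

-- ===== LEMMAS AND PROOFS =====

-- a well-formed group summary: the 3-list of counts, each between 0 and 5
def pvGood (l : List Int) : Prop :=
  ∃ d i s, l = [d, i, s] ∧ 0 ≤ d ∧ d ≤ 5 ∧ 0 ≤ i ∧ i ≤ 5 ∧ 0 ≤ s ∧ s ≤ 5

def pvKeyOf (l : List Int) : Int := 36 * l.getD 0 0 + 6 * l.getD 1 0 + l.getD 2 0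

def pvFatRow (t l : List Int) : Int :=
  t.getD 0 0 * l.getD 0 0 + t.getD 1 0 * l.getD 1 0 + t.getD 2 0 * l.getD 2 0

def pvFatK (f : Int × Int × Int) (k : Int) : Int :=
  f.1 * (k / 36) + f.2.1 * (k % 36 / 6) + f.2.2 * (k % 6)

-- reference: consume the (descending) key stream quota segment by quota segment
def pvConsume : List Int → List (Nat × (Int × Int × Int)) → Int → Int
  | _, [], a => a
  | ks, (n, f) :: rest, a =>
    pvConsume (ks.drop n) rest (a + ((ks.take n).map (pvFatK f)).sum)

-- A-side analogue on triple lists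
def pvConsumeA : List (List Int) → List (Int × List Int) → Int → Int
  | _, [], a => a
  | R, (p, t) :: rest, a =>
    pvConsumeA (R.drop p.toNat) rest (a + ((R.take p.toNat).map (pvFatRow t)).sum)

-- ---- A side ----
lemma pvInnerA_le (t : List Int) : ∀ (n : Nat) (R : List (List Int)) (a : Int), n ≤ R.length →
    pvInnerA n R.reverse t a = (false, (R.drop n).reverse, a + ((R.take n).map (pvFatRow t)).sum) := by
  intro n
  induction n with
  | zero => intro R a _; simp [pvInnerA]
  | succ n ih =>
    intro R a h
    cases R with
    | nil => simp at h
    | cons r R' =>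
      simp only [List.reverse_cons, pvInnerA, List.getLast?_concat, List.dropLast_concat]
      rw [ih R' _ (by simpa using h)]
      simp [List.take_succ_cons, List.drop_succ_cons, pvFatRow]
      ring_nf

lemma pvInnerA_gt (t : List Int) : ∀ (n : Nat) (R : List (List Int)) (a : Int), R.length < n →
    pvInnerA n R.reverse t a = (true, [], a + (R.map (pvFatRow t)).sum) := by
  intro n
  induction n with
  | zero => intro R a h; omega
  | succ n ih =>
    intro R a h
    cases R with
    | nil => simp [pvInnerA]
    | cons r R' =>
      simp only [List.reverse_cons, pvInnerA, List.getLast?_concat, List.dropLast_concat]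
      rw [ih R' _ (by simpa using h)]
      simp [pvFatRow]
      ring_nf

lemma pvConsumeA_nil : ∀ (qs : List (Int × List Int)) (a : Int), pvConsumeA [] qs a = a := by
  intro qs
  induction qs with
  | nil => intro a; rfl
  | cons q rest ih => intro a; cases q with | mk p t => simp [pvConsumeA, ih]

lemma pvOuterA_eq : ∀ (qs : List (Int × List Int)) (R : List (List Int)) (a : Int),
    pvOuterA qs R.reverse a = pvConsumeA R qs a := by
  intro qs
  induction qs with
  | nil => intro R a; rfl
  | cons q rest ih =>
    intro R a
    cases q with
    | mk p t =>
      by_cases h : p.toNat ≤ R.length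
      · rw [pvOuterA, pvInnerA_le t p.toNat R a h]
        show pvOuterA rest (R.drop p.toNat).reverse _ = _
        rw [ih]
        rfl
      · rw [pvOuterA, pvInnerA_gt t p.toNat R a (by omega)]
        rw [pvConsumeA]
        rw [List.drop_eq_nil_of_le (by omega), List.take_of_length_le (by omega), pvConsumeA_nil]

-- bridge: A's consumption, on good rows, is pvConsume of the key stream
lemma pvConsumeA_eq_pvConsume : ∀ (fq : List (Int × (Int × Int × Int))) (R : List (List Int)) (a : Int),
    (∀ l ∈ R, pvGood l) →
    pvConsumeA R (fq.map (fun pf => (pf.1, [pf.2.1, pf.2.2.1, pf.2.2.2]))) a =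
      pvConsume (R.map pvKeyOf) (fq.map (fun pf => (pf.1.toNat, pf.2))) a := by
  intro fq
  induction fq with
  | nil => intro R a _; rfl
  | cons pf rest ih =>
    intro R a hG
    obtain ⟨p, f⟩ := pf
    simp only [List.map_cons, pvConsumeA, pvConsume]
    rw [← List.map_take, ← List.map_drop, List.map_map]
    have hsum : (List.take p.toNat R).map (pvFatRow [f.1, f.2.1, f.2.2])
        = (List.take p.toNat R).map (pvFatK f ∘ pvKeyOf) := by
      apply List.map_congr_left
      intro l hl
      obtain ⟨d, i, s, rfl, hd0, hd5, hi0, hi5, hs0, hs5⟩ := hG l (List.mem_of_mem_take hl)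
      simp only [pvFatRow, pvFatK, pvKeyOf, Function.comp_apply, List.getD_cons_zero,
        List.getD_cons_succ]
      rw [show (36 * d + 6 * i + s) / 36 = d by omega,
          show (36 * d + 6 * i + s) % 36 / 6 = i by omega,
          show (36 * d + 6 * i + s) % 6 = s by omega]
    rw [hsum]
    exact ih _ _ (fun l hl => hG l (List.mem_of_mem_drop hl))

-- ---- B side ----
-- the per-step fatigue expression of Source B equals pvFatK (floordiv/mod = ediv/emod, divisors > 0)
lemma pvStepVal (f : Int × Int × Int) (k : Int) :
    f.1 * PySem.Int.floordiv k 36 +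
      f.2.1 * PySem.Int.floordiv (PySem.Int.mod k 36) 6 +
      f.2.2 * PySem.Int.mod (PySem.Int.mod k 36) 6 = pvFatK f k := by
  rw [PySem.Int.floordiv_eq_ediv_of_pos (by norm_num : (0:Int) < 36),
      PySem.Int.mod_eq_emod_of_pos (by norm_num : (0:Int) < 36),
      PySem.Int.floordiv_eq_ediv_of_pos (by norm_num : (0:Int) < 6),
      PySem.Int.mod_eq_emod_of_pos (by norm_num : (0:Int) < 6),
      Int.emod_emod_of_dvd k (by norm_num : (6:Int) ∣ 36)]
  rfl

lemma pvInnerB_le (f : Int × Int × Int) : ∀ (n : Nat) (ord : List Int) (idx : Nat) (a : Int),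
    idx + n ≤ ord.length →
    pvInnerB n ord idx f a =
      (false, idx + n, a + (((ord.drop idx).take n).map (pvFatK f)).sum) := by
  intro n
  induction n with
  | zero => intro ord idx a _; simp [pvInnerB]
  | succ n ih =>
    intro ord idx a h
    have hlt : idx < ord.length := by omega
    rw [pvInnerB, if_neg (by omega)]
    simp only []
    rw [pvStepVal, ih ord (idx + 1) _ (by omega)]
    rw [List.drop_eq_getElem_cons hlt, List.take_succ_cons, List.map_cons, List.sum_cons]
    have : ord.getD idx 0 = ord[idx] := by
      rw [List.getD_eq_getElem?_getD, List.getElem?_eq_getElem hlt]; rfl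
    rw [this]
    refine Prod.ext rfl (Prod.ext (by simp; omega) ?_)
    simp only []
    ring

lemma pvInnerB_gt (f : Int × Int × Int) : ∀ (n : Nat) (ord : List Int) (idx : Nat) (a : Int),
    ord.length < idx + n → idx ≤ ord.length →
    pvInnerB n ord idx f a =
      (true, ord.length, a + ((ord.drop idx).map (pvFatK f)).sum) := by
  intro n
  induction n with
  | zero => intro ord idx a h _; omega
  | succ n ih =>
    intro ord idx a h hidx
    by_cases he : idx = ord.length
    · subst he
      rw [pvInnerB, if_pos rfl]
      simp
    · have hlt : idx < ord.length := by omega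
      rw [pvInnerB, if_neg he]
      simp only []
      rw [pvStepVal, ih ord (idx + 1) _ (by omega) (by omega)]
      rw [List.drop_eq_getElem_cons hlt, List.map_cons, List.sum_cons]
      have : ord.getD idx 0 = ord[idx] := by
        rw [List.getD_eq_getElem?_getD, List.getElem?_eq_getElem hlt]; rfl
      rw [this]
      refine Prod.ext rfl (Prod.ext rfl ?_)
      simp only []
      ring

lemma pvConsume_nil : ∀ (qs : List (Nat × (Int × Int × Int))) (a : Int), pvConsume [] qs a = a := by
  intro qs
  induction qs with
  | nil => intro a; rfl
  | cons q rest ih => intro a; cases q with | mk p f => simp [pvConsume, ih]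

lemma pvOuterB_eq : ∀ (qs : List (Int × (Int × Int × Int))) (ord : List Int) (idx : Nat) (a : Int),
    idx ≤ ord.length →
    pvOuterB qs ord idx a =
      pvConsume (ord.drop idx) (qs.map (fun pf => (pf.1.toNat, pf.2))) a := by
  intro qs
  induction qs with
  | nil => intro ord idx a _; rfl
  | cons q rest ih =>
    intro ord idx a hidx
    cases q with
    | mk p f =>
      by_cases h : idx + p.toNat ≤ ord.length
      · rw [pvOuterB, pvInnerB_le f p.toNat ord idx a h]
        simp only [List.map_cons]
        rw [pvConsume, ih ord (idx + p.toNat) _ h, List.drop_drop]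
      · rw [pvOuterB, pvInnerB_gt f p.toNat ord idx a (by omega) hidx]
        simp only [List.map_cons]
        rw [pvConsume,
          List.take_of_length_le (l := ord.drop idx) (i := p.toNat)
            (by rw [List.length_drop]; omega),
          List.drop_eq_nil_of_le (as := ord.drop idx)
            (by rw [List.length_drop]; omega), pvConsume_nil]

-- ---- key-stream lemmas ----
lemma pvCount_flatMap_replicate (cf : Int → Nat) : ∀ (KS : List Int) (v : Int), KS.Nodup →
    List.count v (KS.flatMap fun k => List.replicate (cf k) k) = if v ∈ KS then cf v else 0 := by
  intro KS
  induction KS with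
  | nil => intro v _; simp
  | cons k KS ih =>
    intro v hnd
    rw [List.flatMap_cons, List.count_append, ih v (List.nodup_cons.mp hnd).2]
    by_cases hv : v = k
    · subst hv
      simp [(List.nodup_cons.mp hnd).1]
    · simp [List.count_replicate, hv, Ne.symm hv]

lemma pvPairwise_ge_flatMap_replicate (cf : Int → Nat) : ∀ (KS : List Int), KS.Pairwise (· > ·) →
    (KS.flatMap fun k => List.replicate (cf k) k).Pairwise (fun a b => b ≤ a) := by
  intro KS
  induction KS with
  | nil => intro _; simp
  | cons k KS ih =>
    intro hp
    rw [List.flatMap_cons, List.pairwise_append]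
    refine ⟨?_, ih (List.pairwise_cons.mp hp).2, ?_⟩
    · rw [List.pairwise_replicate]; right; omega
    · intro x hx y hy
      rw [List.eq_of_mem_replicate hx]
      obtain ⟨k', hk', hy'⟩ := List.mem_flatMap.mp hy
      rw [List.eq_of_mem_replicate hy']
      have := (List.pairwise_cons.mp hp).1 k' hk'
      omega

lemma pvKeyOf_mono (a b : List Int) (ha : pvGood a) (hb : pvGood b) (hab : a ≤ b) :
    pvKeyOf a ≤ pvKeyOf b := by
  obtain ⟨d, i, s, rfl, hd0, hd5, hi0, hi5, hs0, hs5⟩ := ha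
  obtain ⟨d', i', s', rfl, hd0', hd5', hi0', hi5', hs0', hs5'⟩ := hb
  rcases lt_or_eq_of_le hab with h | h
  · rw [List.cons_lt_cons_iff] at h
    rcases h with h | ⟨rfl, h⟩
    · simp only [pvKeyOf, List.getD_cons_zero, List.getD_cons_succ]; omega
    · rw [List.cons_lt_cons_iff] at h
      rcases h with h | ⟨rfl, h⟩
      · simp only [pvKeyOf, List.getD_cons_zero, List.getD_cons_succ]; omega
      · rw [List.cons_lt_cons_iff] at h
        rcases h with h | ⟨rfl, h⟩
        · simp only [pvKeyOf, List.getD_cons_zero, List.getD_cons_succ]; omega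
        · simp at h
  · rw [h]

-- slicing a prefix commutes with map
lemma pvSlice_map {α β : Type} (f : α → β) (l : List α) (T : Int) :
    PySem.List.slice (l.map f) none (some T) = (PySem.List.slice l none (some T)).map f := by
  by_cases hT : 0 ≤ T
  · rw [PySem.List.slice_to _ hT, PySem.List.slice_to _ hT, List.map_take]
  · have hk : 0 < (-T).toNat := by omega
    rw [show T = -(((-T).toNat : Nat) : Int) by omega]
    rw [PySem.List.slice_to_neg_natCast _ _ hk, PySem.List.slice_to_neg_natCast _ _ hk]
    rw [List.map_take, List.length_map]

-- proof-side names for the per-group summaries of each port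
def pvFA (minerals : List String) (i : Int) : List Int :=
  [(PySem.List.count (PySem.List.slice minerals (some (i * 5)) (some ((i + 1) * 5))) "diamond" : Int),
   (PySem.List.count (PySem.List.slice minerals (some (i * 5)) (some ((i + 1) * 5))) "iron" : Int),
   (PySem.List.count (PySem.List.slice minerals (some (i * 5)) (some ((i + 1) * 5))) "stone" : Int)]

def pvTripStep (st : Int × Int × Int) (m : String) : Int × Int × Int :=
  if m = "diamond" then (st.1 + 1, st.2.1, st.2.2)
  else if m = "iron" then (st.1, st.2.1 + 1, st.2.2)
  else if m = "stone" then (st.1, st.2.1, st.2.2 + 1)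
  else st

def pvKeyB (minerals : List String) (g : Int) : Int :=
  let trip := (PySem.List.slice minerals (some (5 * g)) (some (5 * g + 5))).foldl pvTripStep (0, 0, 0)
  36 * trip.1 + 6 * trip.2.1 + trip.2.2

lemma pvTrip_eq : ∀ (part : List String) (acc : Int × Int × Int),
    part.foldl pvTripStep acc =
      (acc.1 + (List.count "diamond" part : Int),
       acc.2.1 + (List.count "iron" part : Int),
       acc.2.2 + (List.count "stone" part : Int)) := by
  intro part
  induction part with
  | nil => intro acc; simp
  | cons m t ih =>
    intro acc
    rw [List.foldl_cons, ih]
    simp only [pvTripStep]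
    split_ifs with h1 h2 h3 <;> simp_all <;> omega

lemma pvKeyB_eq_keyOf_fA (minerals : List String) (i : Int) :
    pvKeyB minerals i = pvKeyOf (pvFA minerals i) := by
  simp only [pvKeyB, pvFA, pvKeyOf, pvTrip_eq, PySem.List.count_eq,
    List.getD_cons_zero, List.getD_cons_succ]
  rw [show (i + 1) * 5 = i * 5 + 5 by omega]
  ring_nf

lemma pvGood_fA (minerals : List String) (i : Int) (hi : 0 ≤ i) : pvGood (pvFA minerals i) := by
  refine ⟨_, _, _, rfl, Int.natCast_nonneg _, ?_, Int.natCast_nonneg _, ?_,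
    Int.natCast_nonneg _, ?_⟩
  all_goals
    simp only [PySem.List.count_eq]
    refine le_trans (Int.ofNat_le.mpr (List.count_le_length)) ?_
    rw [PySem.List.length_slice]
    simp only [PySem.List.clampIdx]
    split_ifs <;> push_cast <;> omega

lemma pvA_eq (picks : List Int) (minerals : List String) :
    solution picks minerals =
      pvConsume
        (((PySem.List.sorted
            (PySem.List.slice
              ((PySem.List.pyRange 0 (PySem.Int.floordiv ((minerals.length : Int) + 4) 5) 1).map (pvFA minerals))
              none (some picks.sum))
            (fun x => x)).reverse).map pvKeyOf)
        ((picks.zip [((1:Int), (1:Int), (1:Int)), (5, 1, 1), (25, 5, 1)]).map (fun pf => (pf.1.toNat, pf.2))) 0 := by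
  simp only [solution]
  show pvOuterA _
      (PySem.List.sorted
        (PySem.List.slice
          (List.foldl (fun acc i => acc ++ [pvFA minerals i]) []
            (PySem.List.pyRange 0 (PySem.Int.floordiv ((minerals.length : Int) + 4) 5) 1))
          none (some picks.sum))
        (fun x => x)) 0 = _
  rw [PySem.List.foldl_append_singleton_eq_map, List.nil_append]
  have hGood : ∀ l ∈ (PySem.List.sorted
      (PySem.List.slice
        ((PySem.List.pyRange 0 (PySem.Int.floordiv ((minerals.length : Int) + 4) 5) 1).map (pvFA minerals))
        none (some picks.sum)) (fun x => x)).reverse, pvGood l := by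
    intro l hl
    rw [List.mem_reverse, PySem.List.mem_sorted] at hl
    have hl2 := PySem.List.mem_of_mem_slice _ _ _ hl
    obtain ⟨i, hi, rfl⟩ := List.mem_map.mp hl2
    exact pvGood_fA minerals i (PySem.List.mem_pyRange_one.mp hi).1
  conv_lhs =>
    rw [← List.reverse_reverse (PySem.List.sorted _ _),
      show ([[1, 1, 1], [5, 1, 1], [25, 5, 1]] : List (List Int))
          = ([((1:Int), (1:Int), (1:Int)), (5, 1, 1), (25, 5, 1)]).map
              (fun f => [f.1, f.2.1, f.2.2]) from rfl,
      List.zip_map_right]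
  rw [pvOuterA_eq]
  rw [show List.map (Prod.map id (fun (f : Int × Int × Int) => [f.1, f.2.1, f.2.2]))
        (picks.zip [((1:Int), (1:Int), (1:Int)), (5, 1, 1), (25, 5, 1)])
      = List.map (fun pf => (pf.1, [pf.2.1, pf.2.2.1, pf.2.2.2]))
        (picks.zip [((1:Int), (1:Int), (1:Int)), (5, 1, 1), (25, 5, 1)]) from rfl]
  exact pvConsumeA_eq_pvConsume _ _ 0 hGood

set_option maxHeartbeats 1000000 in
lemma pvB_eq (picks : List Int) (minerals : List String) :
    solution_alt picks minerals =
      pvConsume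
        ((PySem.List.pyRange 215 (-1) (-1)).flatMap (fun k =>
          List.replicate
            (List.count k (PySem.List.slice
              ((PySem.List.pyRange 0 (PySem.Int.floordiv ((minerals.length : Int) + 4) 5) 1).map
                (pvKeyB minerals)) none (some picks.sum))) k))
        ((picks.zip [((1:Int), (1:Int), (1:Int)), (5, 1, 1), (25, 5, 1)]).map (fun pf => (pf.1.toNat, pf.2))) 0 := by
  simp only [solution_alt]
  rw [show (fun (st : Int × Int × Int) (m : String) =>
        if m = "diamond" then (st.1 + 1, st.2.1, st.2.2)
        else if m = "iron" then (st.1, st.2.1 + 1, st.2.2)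
        else if m = "stone" then (st.1, st.2.1, st.2.2 + 1)
        else st) = pvTripStep from rfl]
  rw [show (fun (acc : List Int) (g : Int) => acc ++
        [36 * (List.foldl pvTripStep (0, 0, 0)
            (PySem.List.slice minerals (some (5 * g)) (some (5 * g + 5)))).1 +
          6 * (List.foldl pvTripStep (0, 0, 0)
            (PySem.List.slice minerals (some (5 * g)) (some (5 * g + 5)))).2.1 +
          (List.foldl pvTripStep (0, 0, 0)
            (PySem.List.slice minerals (some (5 * g)) (some (5 * g + 5)))).2.2])
      = (fun (acc : List Int) (g : Int) => acc ++ [pvKeyB minerals g]) from rfl]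
  rw [PySem.List.foldl_append_singleton_eq_map, List.nil_append]
  set KM : List Int := PySem.List.slice
      ((PySem.List.pyRange 0 (PySem.Int.floordiv ((minerals.length : Int) + 4) 5) 1).map
        (pvKeyB minerals)) none (some picks.sum) with hKM
  have hdict : ∀ k : Int,
      (KM.foldl (fun d k => d.modify k 0 fun x => x + 1) PySem.Dict.empty).getD k 0
        = ((List.count k KM : Nat) : Int) := by
    intro k
    rw [PySem.Dict.getD_foldl_modify_add_one, PySem.Dict.getD_empty]
    ring
  have horder : (PySem.List.pyRange 215 (-1) (-1)).foldl
      (fun acc key => acc ++ PySem.List.pyRepeat [key]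
        ((KM.foldl (fun d k => d.modify k 0 fun x => x + 1) PySem.Dict.empty).getD key 0)) []
      = (PySem.List.pyRange 215 (-1) (-1)).flatMap (fun k =>
          List.replicate (List.count k KM) k) := by
    rw [PySem.List.foldl_append_eq_flatMap, List.nil_append]
    apply List.flatMap_congr
    intro k _
    rw [hdict k, PySem.List.pyRepeat_singleton, Int.toNat_natCast]
  rw [horder]
  exact pvOuterB_eq _ _ 0 0 (Nat.zero_le _)

set_option maxHeartbeats 1000000 in
lemma pvKeys_eq (picks : List Int) (minerals : List String) :
    ((PySem.List.sorted
        (PySem.List.slice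
          ((PySem.List.pyRange 0 (PySem.Int.floordiv ((minerals.length : Int) + 4) 5) 1).map (pvFA minerals))
          none (some picks.sum))
        (fun x => x)).reverse).map pvKeyOf
      = (PySem.List.pyRange 215 (-1) (-1)).flatMap (fun k =>
          List.replicate
            (List.count k (PySem.List.slice
              ((PySem.List.pyRange 0 (PySem.Int.floordiv ((minerals.length : Int) + 4) 5) 1).map
                (pvKeyB minerals)) none (some picks.sum))) k) := by
  set G : Int := PySem.Int.floordiv ((minerals.length : Int) + 4) 5 with hG
  set T : Int := picks.sum with hT
  set L : List (List Int) := (PySem.List.pyRange 0 G 1).map (pvFA minerals) with hL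
  -- B's sliced key list = the key image of A's sliced triple list
  have hKM2 : PySem.List.slice ((PySem.List.pyRange 0 G 1).map (pvKeyB minerals)) none (some T)
      = (PySem.List.slice L none (some T)).map pvKeyOf := by
    rw [show (PySem.List.pyRange 0 G 1).map (pvKeyB minerals) = L.map pvKeyOf by
      rw [hL, List.map_map]
      apply List.map_congr_left
      intro i _
      exact pvKeyB_eq_keyOf_fA minerals i]
    exact pvSlice_map pvKeyOf L T
  rw [hKM2]
  set KM : List Int := (PySem.List.slice L none (some T)).map pvKeyOf with hKM
  set S : List (List Int) := PySem.List.sorted (PySem.List.slice L none (some T)) (fun x => x) with hS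
  have hGoodS : ∀ l ∈ S.reverse, pvGood l := by
    intro l hl
    rw [List.mem_reverse, hS, PySem.List.mem_sorted] at hl
    have hl2 := PySem.List.mem_of_mem_slice _ _ _ hl
    rw [hL] at hl2
    obtain ⟨i, hi, rfl⟩ := List.mem_map.mp hl2
    exact pvGood_fA minerals i (PySem.List.mem_pyRange_one.mp hi).1
  -- the two key streams are permutations with the same descending order
  have hperm : (S.reverse.map pvKeyOf).Perm KM := by
    rw [hKM]
    exact ((S.reverse_perm).trans (PySem.List.sorted_perm _ _ _)).map pvKeyOf
  have hKS : (PySem.List.pyRange 215 (-1) (-1)).Pairwise (· > ·) := by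
    rw [PySem.List.pyRange_neg_one_eq_reverse, List.pairwise_reverse]
    exact PySem.List.pairwise_lt_pyRange_one (-1 + 1) (215 + 1)
  have hndKS : (PySem.List.pyRange 215 (-1) (-1)).Nodup := by
    rw [PySem.List.pyRange_neg_one_eq_reverse]
    exact List.nodup_reverse.mpr (PySem.List.nodup_pyRange_one _ _)
  have hmemKS : ∀ v : Int, v ∈ PySem.List.pyRange 215 (-1) (-1) ↔ -1 < v ∧ v ≤ 215 :=
    fun v => PySem.List.mem_pyRange_neg_one
  have hKMrange : ∀ v ∈ KM, 0 ≤ v ∧ v ≤ 215 := by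
    intro v hv
    rw [hKM] at hv
    obtain ⟨l, hl, rfl⟩ := List.mem_map.mp hv
    have hl2 := PySem.List.mem_of_mem_slice _ _ _ hl
    rw [hL] at hl2
    obtain ⟨i, hi, rfl⟩ := List.mem_map.mp hl2
    obtain ⟨d, i', s, heq, h⟩ := pvGood_fA minerals i (PySem.List.mem_pyRange_one.mp hi).1
    rw [heq]
    simp only [pvKeyOf, List.getD_cons_zero, List.getD_cons_succ]
    omega
  have hcount : ∀ v : Int, List.count v (S.reverse.map pvKeyOf)
      = List.count v ((PySem.List.pyRange 215 (-1) (-1)).flatMap (fun k =>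
          List.replicate (List.count k KM) k)) := by
    intro v
    rw [hperm.count_eq]
    rw [pvCount_flatMap_replicate (fun k => List.count k KM) _ v hndKS]
    by_cases hv : v ∈ PySem.List.pyRange 215 (-1) (-1)
    · rw [if_pos hv]
    · rw [if_neg hv]
      rw [List.count_eq_zero]
      intro hvKM
      exact hv ((hmemKS v).mpr (by have := hKMrange v hvKM; omega))
  have hP1 : (S.reverse.map pvKeyOf).Pairwise (fun a b => b ≤ a) := by
    rw [List.pairwise_map, List.pairwise_reverse, hS]
    have hsp : List.Pairwise (fun (a b : List Int) => a ≤ b)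
        (PySem.List.sorted (PySem.List.slice L none (some T)) (fun x => x)) := by
      convert PySem.List.sorted_pairwise (PySem.List.slice L none (some T))
        (fun x : List Int => x) using 2
    refine List.Pairwise.imp_of_mem ?_ hsp
    intro a b ha hb hab
    have hga : pvGood a := hGoodS a (List.mem_reverse.mpr (by rw [hS]; exact ha))
    have hgb : pvGood b := hGoodS b (List.mem_reverse.mpr (by rw [hS]; exact hb))
    exact pvKeyOf_mono a b hga hgb hab
  have hP2 : ((PySem.List.pyRange 215 (-1) (-1)).flatMap (fun k =>
      List.replicate (List.count k KM) k)).Pairwise (fun a b => b ≤ a) :=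
    pvPairwise_ge_flatMap_replicate _ _ hKS
  exact List.Perm.eq_of_pairwise (fun a b _ _ h1 h2 => by omega) hP1 hP2
    (List.perm_iff_count.mpr hcount)

lemma pvMain (picks : List Int) (minerals : List String) :
    solution picks minerals = solution_alt picks minerals := by
  rw [pvA_eq, pvB_eq, pvKeys_eq]

-- ===== VERDICT (by name: the statement is the Claim_ definition above) =====
theorem solution_spec : Claim_equal_solution := by
  intro picks minerals _
  exact pvMain picks minerals
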